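-- pv_equiv track=rewrite | github.com/RobertoCampisi/advent-of-code | 2017/day04.py | valid_passphrase
-- ===== SOURCE A (Python) =====
-- def valid_passphrase(pssphrs):
--     seen = set()
--     for w in pssphrs:
--         if w in seen:
--             return False
--         else:
--             seen.add(w)
--     return True
-- ===== SOURCE B (Python) =====
-- def valid_passphrase(pssphrs):
--     words = list(pssphrs)
--     return len(words) == len(set(words))
-- ===== Notes on version B (the rewrite author's own statement) =====
-- stated objective: idiomatic
-- what changed: Replaces the early-exit scan with an incremental seen-set by materializing the words once and comparing len(words) with len(set(words)).
import Mathlib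
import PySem

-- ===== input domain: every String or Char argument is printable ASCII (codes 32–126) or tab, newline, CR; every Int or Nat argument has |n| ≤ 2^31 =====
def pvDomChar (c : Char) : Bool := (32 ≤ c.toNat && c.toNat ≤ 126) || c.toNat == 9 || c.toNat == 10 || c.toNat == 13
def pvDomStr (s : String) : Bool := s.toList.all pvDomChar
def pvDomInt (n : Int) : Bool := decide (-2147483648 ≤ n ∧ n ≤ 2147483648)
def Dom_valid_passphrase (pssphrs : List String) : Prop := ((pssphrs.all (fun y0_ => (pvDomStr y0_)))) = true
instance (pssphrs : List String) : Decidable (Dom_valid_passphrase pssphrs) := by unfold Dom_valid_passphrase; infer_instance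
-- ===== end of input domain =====

-- B replaces A's early-exit scan with a seen-set by one set construction plus a length comparison (idiomatic).

-- ===== PORT A =====
-- the 'for w in pssphrs' loop with early 'return False', carrying the 'seen' set
def validAuxA (seen : PySem.Set String) : List String → Bool
  | [] => true
  | w :: rest =>
      if PySem.Set.contains seen w then false
      else validAuxA (PySem.Set.add seen w) rest

def valid_passphrase (pssphrs : List String) : Bool :=
  validAuxA PySem.Set.empty pssphrs

-- ===== PORT B =====
def valid_passphrase_alt (pssphrs : List String) : Bool :=
  let words := pssphrs
  words.length == (PySem.Set.ofList words).length

-- ===== PRECONDITION & SPEC =====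
def Spec_valid_passphrase (pssphrs : List String) (out : Bool) : Prop := out = valid_passphrase_alt pssphrs
instance (pssphrs : List String) (out : Bool) : Decidable (Spec_valid_passphrase pssphrs out) := by unfold Spec_valid_passphrase; infer_instance

-- ===== CLAIM (what is proved, stated in full; the proofs are below) =====
def Claim_equal_valid_passphrase : Prop := ∀ (pssphrs : List String), Dom_valid_passphrase pssphrs → Spec_valid_passphrase pssphrs (valid_passphrase pssphrs)

-- ===== LEMMAS AND PROOFS =====

theorem length_add_le (s : PySem.Set String) (x : String) :
    (PySem.Set.add s x).length ≤ s.length + 1 := by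
  simp [PySem.Set.add]; split <;> simp

theorem length_update_le (l : List String) (s : PySem.Set String) :
    (PySem.Set.update s l).length ≤ s.length + l.length := by
  induction l generalizing s with
  | nil => simp [PySem.Set.update]
  | cons x xs ih =>
      have h1 := length_add_le s x
      have h2 := ih (PySem.Set.add s x)
      simp [PySem.Set.update] at h2 ⊢
      omega

theorem validAuxA_eq (l : List String) (s : PySem.Set String) :
    validAuxA s l = decide (s.length + l.length = (PySem.Set.update s l).length) := by
  induction l generalizing s with
  | nil => simp [validAuxA, PySem.Set.update]
  | cons w rest ih =>
      by_cases h : PySem.Set.contains s w = true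
      · have hmem : w ∈ s := by simpa [PySem.Set.contains] using h
        have hadd : PySem.Set.add s w = s := by simp [PySem.Set.add, hmem]
        have hle := length_update_le rest s
        simp only [validAuxA, h, if_true]
        have : PySem.Set.update s (w :: rest) = PySem.Set.update s rest := by
          simp [PySem.Set.update, hadd]
        rw [this]
        symm
        simp only [decide_eq_false_iff_not, List.length_cons]
        omega
      · have hmem : w ∉ s := by simpa [PySem.Set.contains] using h
        have hadd : (PySem.Set.add s w).length = s.length + 1 := by
          simp [PySem.Set.add, hmem]
        simp only [validAuxA, h, if_false, Bool.false_eq_true]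
        rw [ih (PySem.Set.add s w)]
        have hupd : PySem.Set.update s (w :: rest) = PySem.Set.update (PySem.Set.add s w) rest := by
          simp [PySem.Set.update]
        rw [hupd]
        exact decide_eq_decide.mpr (by simp only [List.length_cons]; omega)

-- ===== VERDICT (by name: the statement is the Claim_ definition above) =====
theorem valid_passphrase_spec : Claim_equal_valid_passphrase := by
  intro pssphrs _
  unfold Spec_valid_passphrase valid_passphrase valid_passphrase_alt
  rw [validAuxA_eq]
  have h : PySem.Set.update PySem.Set.empty pssphrs = PySem.Set.ofList pssphrs :=
    PySem.Set.update_nil_left pssphrs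
  rw [h]
  simp [PySem.Set.empty, beq_eq_decide]
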